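-- pv_equiv track=rewrite | github.com/20jastrobel/Holstein_test | pipelines/exact_bench/hh_fixed_seed_budgeted_projected_dynamics.py | _parse_int_tuple
-- ===== SOURCE A (Python) =====
-- def _parse_int_tuple(raw: str) -> tuple[int, ...]:
--     text = str(raw).strip()
--     if text == "":
--         return ()
--     seen: set[int] = set()
--     out: list[int] = []
--     for part in text.split(","):
--         item = part.strip()
--         if item == "":
--             continue
--         value = int(item)
--         if value <= 0:
--             raise ValueError("prefix lists must contain positive integers.")
--         if value in seen:
--             continue
--         seen.add(value)
--         out.append(value)
--     return tuple(out)
-- ===== SOURCE B (Python) =====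
-- def _parse_int_tuple(raw: str) -> tuple[int, ...]:
--     # Single character-level scan (no split): accumulate a field, flush at each
--     # comma (a sentinel comma flushes the last field); then order-preserving
--     # dedup by a prefix-membership scan (no set/dict).
--     values: list[int] = []
--     field = ""
--     for ch in str(raw).strip() + ",":
--         if ch == ",":
--             item = field.strip()
--             field = ""
--             if item != "":
--                 value = int(item)
--                 if value <= 0:
--                     raise ValueError("prefix lists must contain positive integers.")
--                 values.append(value)
--         else:
--             field += ch
--     return tuple(v for i, v in enumerate(values) if v not in values[:i])
-- ===== Notes on version B (the rewrite author's own statement) =====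
-- stated objective: alternative
-- what changed: A splits the string into parts and dedups with a seen-set inside one loop; B never calls split: it scans the string character by character with a field accumulator (flushed at each comma, with a sentinel comma), and deduplicates afterwards by a quadratic prefix-membership scan instead of a set.
import Mathlib
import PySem

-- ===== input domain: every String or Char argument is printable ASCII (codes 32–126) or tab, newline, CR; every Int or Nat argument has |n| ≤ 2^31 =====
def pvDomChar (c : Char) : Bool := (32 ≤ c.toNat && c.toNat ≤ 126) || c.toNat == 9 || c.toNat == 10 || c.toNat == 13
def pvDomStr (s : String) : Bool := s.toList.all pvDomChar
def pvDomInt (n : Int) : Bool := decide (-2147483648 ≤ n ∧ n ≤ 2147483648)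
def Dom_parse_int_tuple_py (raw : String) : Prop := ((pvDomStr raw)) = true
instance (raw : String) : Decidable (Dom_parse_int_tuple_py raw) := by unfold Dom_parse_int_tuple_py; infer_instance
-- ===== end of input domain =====

-- B replaces A's split-into-parts loop with a seen-set by a character-level scan (field accumulator, sentinel comma) followed by a quadratic prefix-membership dedup; alternative structure, same results.


-- ===== PORT A =====
-- A's for-loop over text.split(","): state (seen, out); returns none where Python raises ValueError
def pyA_loop : List String → PySem.Set Int → List Int → Option (List Int)
  | [], _, out => some out
  | part :: rest, seen, out =>
    let item := PySem.Str.strip part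
    if item = "" then pyA_loop rest seen out
    else
      match PySem.Int.ofStr? item with
      | none => none            -- int(item) raises ValueError
      | some value =>
        if value ≤ 0 then none  -- explicit raise ValueError
        else if seen.contains value then pyA_loop rest seen out
        else pyA_loop rest (PySem.Set.add seen value) (out ++ [value])

def parse_int_tuple_py (raw : String) : List Int :=
  let text := PySem.Str.strip raw
  if text = "" then []
  else
    -- split? with the nonempty literal "," is always some; .getD [] only discharges the Option
    ((pyA_loop ((PySem.Str.split? text ",").getD []) PySem.Set.empty []).getD [])
    -- the outer .getD [] is the ValueError case, excluded by Pre_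

-- ===== PORT B =====
-- B's character loop over text + ",": state (field, values); none where Python raises ValueError
def pyB_scan : List Char → List Char → List Int → Option (List Int)
  | [], _, values => some values
  | c :: rest, field, values =>
    if c = ',' then
      let item := PySem.Chars.strip field
      if item = [] then pyB_scan rest [] values
      else
        match PySem.Int.ofChars? item with
        | none => none            -- int(item) raises ValueError
        | some value =>
          if value ≤ 0 then none  -- explicit raise ValueError
          else pyB_scan rest [] (values ++ [value])
    else pyB_scan rest (field ++ [c]) values

def parse_int_tuple_py_alt (raw : String) : List Int :=
  match pyB_scan ((PySem.Str.strip raw).toList ++ [',']) [] [] with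
  | none => []                    -- ValueError, excluded by Pre_
  | some values =>
    -- tuple(v for i, v in enumerate(values) if v not in values[:i])
    ((PySem.List.enumerate values).filter
        (fun p => !((PySem.List.slice values none (some p.1)).contains p.2))).map (·.2)

-- ===== PRECONDITION & SPEC =====
-- Pre_ excludes exactly the inputs on which A raises ValueError: a nonempty comma-field
-- that is not an int literal, or one whose value is ≤ 0. (B raises ValueError there too.)
def Pre_parse_int_tuple_py (raw : String) : Prop :=
  ∀ part ∈ (PySem.Str.split? (PySem.Str.strip raw) ",").getD [],
    PySem.Str.strip part = "" ∨
      ((PySem.Int.ofStr? (PySem.Str.strip part)).any (fun v => decide (0 < v)) = true)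
instance (raw : String) : Decidable (Pre_parse_int_tuple_py raw) := by
  unfold Pre_parse_int_tuple_py; infer_instance
def pvWitness_parse_int_tuple_py : String := " 3, 1,3 ,, 2 "

def Spec_parse_int_tuple_py (raw : String) (out : List Int) : Prop := out = parse_int_tuple_py_alt raw
instance (raw : String) (out : List Int) : Decidable (Spec_parse_int_tuple_py raw out) := by
  unfold Spec_parse_int_tuple_py; infer_instance

-- ===== CLAIM (what is proved, stated in full; the proofs are below) =====
def Claim_equal_parse_int_tuple_py : Prop := ∀ (raw : String), Dom_parse_int_tuple_py raw → Pre_parse_int_tuple_py raw → Spec_parse_int_tuple_py raw (parse_int_tuple_py raw)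

-- ===== LEMMAS AND PROOFS =====

theorem str_eq_empty_iff (s : String) : (s = "") ↔ s.toList = [] := by
  constructor
  · rintro rfl; rfl
  · intro h
    have h2 := congrArg String.ofList h
    rwa [String.ofList_toList] at h2

-- Structural characterisation of splitting at every ',' (proof-side only)
def mySplit : List Char → List (List Char)
  | [] => [[]]
  | c :: rest => if c = ',' then [] :: mySplit rest else (mySplit rest).modifyHead (c :: ·)

theorem mySplit_ne_nil (cs : List Char) : mySplit cs ≠ [] := by
  cases cs with
  | nil => simp [mySplit]
  | cons c rest =>
    by_cases h : c = ','
    · simp [mySplit, h]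
    · simp only [mySplit, if_neg h]
      cases hrest : mySplit rest with
      | nil => exact absurd hrest (mySplit_ne_nil rest)
      | cons a t => simp [List.modifyHead]

theorem splitOn_go_comma (fuel : Nat) (l cur : List Char) (acc2 : List (List Char))
    (h : l.length < fuel) :
    PySem.Chars.splitOn.go [','] fuel l cur acc2 =
      acc2.reverse ++ (mySplit l).modifyHead (cur.reverse ++ ·) := by
  induction fuel generalizing l cur acc2 with
  | zero => omega
  | succ fuel ih =>
    cases l with
    | nil =>
      have e : PySem.Chars.splitOn.go [','] (fuel + 1) [] cur acc2 =
          (cur.reverse :: acc2).reverse := rfl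
      rw [e]; simp [mySplit, List.modifyHead]
    | cons c rest =>
      have e : PySem.Chars.splitOn.go [','] (fuel + 1) (c :: rest) cur acc2 =
          if [','].isPrefixOf (c :: rest) = true then
            PySem.Chars.splitOn.go [','] fuel (List.drop 1 (c :: rest)) [] (cur.reverse :: acc2)
          else PySem.Chars.splitOn.go [','] fuel rest (c :: cur) acc2 := rfl
      rw [e]
      by_cases hc : c = ','
      · subst hc
        have hpre : [','].isPrefixOf (',' :: rest) = true := by simp [List.isPrefixOf]
        rw [if_pos hpre, List.drop_one, List.tail_cons,
          ih rest [] (cur.reverse :: acc2) (by simp at h; omega)]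
        cases hres : mySplit rest with
        | nil => exact absurd hres (mySplit_ne_nil rest)
        | cons a t => simp [mySplit, List.modifyHead, hres]
      · have hpre : ¬ ([','].isPrefixOf (c :: rest) = true) := by
          simp [List.isPrefixOf]; exact fun hq => absurd hq.symm hc
        rw [if_neg hpre, ih rest (c :: cur) acc2 (by simp at h; omega)]
        cases hres : mySplit rest with
        | nil => exact absurd hres (mySplit_ne_nil rest)
        | cons a t => simp [mySplit, if_neg hc, hres, List.modifyHead]

theorem splitOn_comma (cs : List Char) :
    PySem.Chars.splitOn cs [','] = mySplit cs := by
  unfold PySem.Chars.splitOn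
  rw [splitOn_go_comma (cs.length + 1) cs [] [] (by omega)]
  cases h : mySplit cs with
  | nil => exact absurd h (mySplit_ne_nil cs)
  | cons a t => simp [List.modifyHead]

-- Sequential parse of the comma-fields (proof-side reference shape shared by both sides)
def parseParts : List String → Option (List Int)
  | [] => some []
  | p :: rest =>
    let item := PySem.Str.strip p
    if item = "" then parseParts rest
    else
      match PySem.Int.ofStr? item with
      | none => none
      | some v => if v ≤ 0 then none else (parseParts rest).map (v :: ·)

-- On valid parts, A's loop started with seen = out computes exactly fold of Set.add over the parsed values
theorem pv_loop_lemma (parts : List String)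
    (h : ∀ part ∈ parts,
      PySem.Str.strip part = "" ∨
        ((PySem.Int.ofStr? (PySem.Str.strip part)).any (fun v => decide (0 < v)) = true)) :
    ∃ vs, parseParts parts = some vs ∧
      ∀ seen : List Int, pyA_loop parts seen seen = some (vs.foldl PySem.Set.add seen) := by
  induction parts with
  | nil => exact ⟨[], rfl, fun _ => rfl⟩
  | cons p rest ih =>
    obtain ⟨vs, hB, hA⟩ := ih (fun q hq => h q (List.mem_cons_of_mem _ hq))
    have hp := h p (List.mem_cons_self ..)
    by_cases hempty : PySem.Str.strip p = ""
    · exact ⟨vs, by simp [parseParts, hempty, hB], fun seen => by simp [pyA_loop, hempty, hA seen]⟩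
    · rcases hp with hp | hp; · exact absurd hp hempty
      cases hv : PySem.Int.ofStr? (PySem.Str.strip p) with
      | none => simp [hv] at hp
      | some v =>
        rw [hv] at hp; simp at hp
        refine ⟨v :: vs, by simp [parseParts, hempty, hv, hB]; omega, fun seen => ?_⟩
        have hnle : ¬ v ≤ 0 := by omega
        by_cases hc : v ∈ seen
        · have hadd : PySem.Set.add seen v = seen := by simp [PySem.Set.add, hc]
          simpa [pyA_loop, hempty, hv, hnle, hc, hadd] using hA seen
        · have hadd : PySem.Set.add seen v = seen ++ [v] := by simp [PySem.Set.add, hc]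
          simpa [pyA_loop, hempty, hv, hnle, hc, hadd] using hA (seen ++ [v])

-- B's character scan over cs ++ [','] is the sequential parse of the comma-fields of cs
theorem parseParts_cons (p : String) (rest : List String) :
    parseParts (p :: rest) =
      if PySem.Str.strip p = "" then parseParts rest
      else
        match PySem.Int.ofStr? (PySem.Str.strip p) with
        | none => none
        | some v => if v ≤ 0 then none else (parseParts rest).map (v :: ·) := rfl

theorem pyB_scan_comma (rest field : List Char) (values : List Int) :
    pyB_scan (',' :: rest) field values =
      if PySem.Chars.strip field = [] then pyB_scan rest [] values
      else
        match PySem.Int.ofChars? (PySem.Chars.strip field) with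
        | none => none
        | some value =>
          if value ≤ 0 then none else pyB_scan rest [] (values ++ [value]) := by
  simp [pyB_scan]

theorem pyB_scan_other (c : Char) (hc : c ≠ ',') (rest field : List Char) (values : List Int) :
    pyB_scan (c :: rest) field values = pyB_scan rest (field ++ [c]) values := by
  simp [pyB_scan, hc]

theorem pv_scan_lemma (cs : List Char) (field : List Char) (values : List Int) :
    pyB_scan (cs ++ [',']) field values =
      (parseParts (((mySplit cs).modifyHead (field ++ ·)).map String.ofList)).map (values ++ ·) := by
  have hempty_iff : ∀ f : List Char,
      (PySem.Str.strip (String.ofList f) = "") ↔ (PySem.Chars.strip f = []) := by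
    intro f; rw [str_eq_empty_iff, PySem.Str.toList_strip]; simp
  have hof : ∀ f : List Char,
      PySem.Int.ofStr? (PySem.Str.strip (String.ofList f)) =
        PySem.Int.ofChars? (PySem.Chars.strip f) := by
    intro f; simp [PySem.Int.ofStr?, PySem.Str.toList_strip]
  induction cs generalizing field values with
  | nil =>
    have hms : ((mySplit ([] : List Char)).modifyHead (fun x => field ++ x)).map String.ofList =
        [String.ofList field] := by simp [mySplit, List.modifyHead]
    rw [List.nil_append, hms, pyB_scan_comma, parseParts_cons]
    by_cases hitem : PySem.Chars.strip field = []
    · rw [if_pos hitem, if_pos ((hempty_iff field).mpr hitem)]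
      simp [pyB_scan, parseParts]
    · rw [if_neg hitem, if_neg (fun hh => hitem ((hempty_iff field).mp hh)), hof field]
      cases hv : PySem.Int.ofChars? (PySem.Chars.strip field) with
      | none => rfl
      | some v =>
        by_cases hle : v ≤ 0
        · simp [hle]
        · simp [hle, pyB_scan, parseParts]
  | cons c cs ih =>
    by_cases hc : c = ','
    · subst hc
      have hms : ((mySplit (',' :: cs)).modifyHead (fun x => field ++ x)).map String.ofList =
          String.ofList field :: (mySplit cs).map String.ofList := by
        simp [mySplit, List.modifyHead]
      have hmh : (mySplit cs).modifyHead (fun x => [] ++ x) = mySplit cs := by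
        cases mySplit cs <;> simp [List.modifyHead]
      rw [List.cons_append, pyB_scan_comma, hms, parseParts_cons]
      by_cases hitem : PySem.Chars.strip field = []
      · rw [if_pos hitem, if_pos ((hempty_iff field).mpr hitem), ih [] values, hmh]
      · rw [if_neg hitem, if_neg (fun hh => hitem ((hempty_iff field).mp hh)), hof field]
        cases hv : PySem.Int.ofChars? (PySem.Chars.strip field) with
        | none => rfl
        | some v =>
          by_cases hle : v ≤ 0
          · simp [hle]
          · have e1 : pyB_scan (cs ++ [',']) [] (values ++ [v]) =
                Option.map (fun x => (values ++ [v]) ++ x)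
                  (parseParts ((mySplit cs).map String.ofList)) := by
              rw [ih [] (values ++ [v]), hmh]
            cases hpp : parseParts ((mySplit cs).map String.ofList) with
            | none => simp [hle, e1, hpp]
            | some l => simp [hle, e1, hpp]
    · have hms : ((mySplit (c :: cs)).modifyHead (fun x => field ++ x)).map String.ofList =
          ((mySplit cs).modifyHead (fun x => field ++ [c] ++ x)).map String.ofList := by
        cases hres : mySplit cs with
        | nil => exact absurd hres (mySplit_ne_nil cs)
        | cons a t => simp [mySplit, hc, hres, List.modifyHead]
      rw [List.cons_append, pyB_scan_other c hc, ih (field ++ [c]) values, hms]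

-- The prefix-membership filter keeps exactly the first occurrences, in order
theorem pv_dedup_lemma (values : List Int) :
    ((PySem.List.enumerate values).filter
        (fun p => !((PySem.List.slice values none (some p.1)).contains p.2))).map (·.2) =
      PySem.List.dedup values := by
  induction values using List.reverseRecOn with
  | nil => rfl
  | append_singleton xs v ih =>
    rw [PySem.List.enumerate_append, List.filter_append, List.map_append]
    have h1 : (PySem.List.enumerate xs 0).filter
          (fun p => !((PySem.List.slice (xs ++ [v]) none (some p.1)).contains p.2)) =
        (PySem.List.enumerate xs 0).filter
          (fun p => !((PySem.List.slice xs none (some p.1)).contains p.2)) := by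
      refine List.filter_congr ?_
      intro p hp
      obtain ⟨k, hk, rfl⟩ := (PySem.List.mem_enumerate_iff xs 0 p).mp hp
      simp only [zero_add, PySem.List.slice_to_natCast,
        List.take_append_of_le_length (le_of_lt hk)]
    rw [h1, ih]
    have h2 : PySem.List.enumerate [v] (0 + (xs.length : Int)) = [((xs.length : Int), v)] := by
      simp [PySem.List.enumerate_cons, PySem.List.enumerate_nil]
    have h3 : PySem.List.slice (xs ++ [v]) none (some ((xs.length : Int))) = xs := by
      rw [PySem.List.slice_to_natCast, List.take_left]
    rw [h2, List.filter_singleton]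
    have hfold : PySem.List.dedup (xs ++ [v]) = PySem.Set.add (PySem.Set.ofList xs) v := by
      rw [PySem.List.dedup_eq_ofList, PySem.Set.ofList_eq_foldl, List.foldl_append,
        ← PySem.Set.ofList_eq_foldl]
      rfl
    rw [hfold]
    by_cases hv : v ∈ xs
    · have ha : PySem.Set.add (PySem.Set.ofList xs) v = PySem.Set.ofList xs := by
        simp [PySem.Set.add, List.contains_eq_mem, PySem.Set.mem_ofList, hv]
      rw [ha]
      simp [h3, hv, List.contains_eq_mem, PySem.List.dedup_eq_ofList]
    · have ha : PySem.Set.add (PySem.Set.ofList xs) v = PySem.Set.ofList xs ++ [v] := by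
        simp [PySem.Set.add, List.contains_eq_mem, PySem.Set.mem_ofList, hv]
      rw [ha]
      simp [h3, hv, List.contains_eq_mem, PySem.List.dedup_eq_ofList]

-- ===== VERDICT (by name: the statement is the Claim_ definition above) =====
theorem parse_int_tuple_py_spec : Claim_equal_parse_int_tuple_py := by
  intro raw _ hpre
  unfold Spec_parse_int_tuple_py parse_int_tuple_py parse_int_tuple_py_alt
  by_cases htext : PySem.Str.strip raw = ""
  · simp only [htext]
    rfl
  · rw [if_neg htext]
    have hsplit : (PySem.Str.split? (PySem.Str.strip raw) ",").getD [] =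
        (mySplit (PySem.Str.strip raw).toList).map String.ofList := by
      have hsep : ("," : String).toList = [','] := rfl
      simp [PySem.Str.split?, hsep, PySem.Chars.split?, splitOn_comma]
    obtain ⟨vs, hvs, hA⟩ := pv_loop_lemma _ hpre
    rw [hsplit] at hvs
    rw [pv_scan_lemma]
    have hmh : (mySplit (PySem.Str.strip raw).toList).modifyHead (fun x => [] ++ x) =
        mySplit (PySem.Str.strip raw).toList := by
      cases mySplit (PySem.Str.strip raw).toList <;> simp [List.modifyHead]
    rw [hmh, hvs]
    simp only [Option.map_some, List.nil_append]
    rw [pv_dedup_lemma]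
    have hA0 := hA []
    have hempty : (PySem.Set.empty : PySem.Set Int) = ([] : List Int) := rfl
    rw [hempty, hA0]
    simp [PySem.List.dedup_eq_ofList, PySem.Set.ofList_eq_foldl]
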